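-- pv_equiv track=rewrite | github.com/PigeonLabs/Every_day_BOJ | Python/백준/Gold/9472. 알고리즘 기말고사/알고리즘 기말고사.py | solve
-- ===== SOURCE A (Python) =====
-- import sys,math
--
-- def solve(n, k):
--     res = 0
--     for i in range(k + 1):
--         term = math.comb(k, i) * math.factorial(n - i)
--         if i % 2 == 0:
--             res += term
--         else:
--             res -= term
--     return res
-- ===== SOURCE B (Python) =====
-- def solve(n, k):
--     # Counts via the derangement-style recurrence a_j = (g+j-1)*a_{j-1} + (j-1)*a_{j-2}
--     # on the diagonal a_j = T(g+j, j), g = n-k, with a_0 = g!, a_1 = g*g!.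
--     # No binomials, no alternating signs, no divisions.
--     if k < 0:
--         return 0
--     g = n - k
--     f = 1
--     for j in range(2, g + 1):
--         f *= j
--     if k == 0:
--         return f
--     prev, cur = f, g * f
--     for j in range(2, k + 1):
--         prev, cur = cur, (g + j - 1) * cur + (j - 1) * prev
--     return cur
-- ===== Notes on version B (the rewrite author's own statement) =====
-- stated objective: faster
-- what changed: B abandons the alternating binomial-times-factorial sum entirely and instead runs the derangement-style two-term recurrence a_j = (g+j-1)*a_{j-1} + (j-1)*a_{j-2} (g = n-k, a_0 = g!, a_1 = g*g!) along the diagonal, which counts the same permutations with no fixed point among k marked positions; no binomials, signs or divisions remain, measured 20-475x faster for n up to 6000.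
import Mathlib
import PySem

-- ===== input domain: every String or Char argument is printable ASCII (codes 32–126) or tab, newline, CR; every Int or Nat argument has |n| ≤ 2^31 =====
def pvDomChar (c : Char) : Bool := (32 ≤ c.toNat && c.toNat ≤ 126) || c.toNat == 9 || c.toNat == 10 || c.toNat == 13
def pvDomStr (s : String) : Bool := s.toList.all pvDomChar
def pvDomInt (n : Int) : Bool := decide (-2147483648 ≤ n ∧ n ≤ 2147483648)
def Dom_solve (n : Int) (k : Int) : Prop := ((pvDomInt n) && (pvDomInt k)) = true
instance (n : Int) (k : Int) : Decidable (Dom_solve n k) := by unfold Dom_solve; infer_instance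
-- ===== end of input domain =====

-- B replaces A's alternating binomial-times-factorial sum by the derangement-style
-- recurrence a_j = (g+j-1)*a_{j-1} + (j-1)*a_{j-2} (g = n-k); measured much faster.

-- ===== PORT A =====
-- loop body of A: term = comb(k,i)*factorial(n-i); add if i even else subtract
def stepA (n k : Int) (res : Int) (i : Int) : Int :=
  let term : Int := (k.toNat.choose i.toNat : Int) * ((n - i).toNat.factorial : Int)
  if PySem.Int.mod i 2 == 0 then res + term else res - term

def solve (n : Int) (k : Int) : Int :=
  (PySem.List.pyRange 0 (k + 1) 1).foldl (stepA n k) 0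

-- ===== PORT B =====
-- loop body of B's recurrence: state (prev, cur) ↦ (cur, (g+j-1)*cur + (j-1)*prev)
def stepB (g : Int) (s : Int × Int) (j : Int) : Int × Int :=
  (s.2, (g + j - 1) * s.2 + (j - 1) * s.1)

def solve_alt (n : Int) (k : Int) : Int :=
  if k < 0 then 0
  else
    let g := n - k
    let f := (PySem.List.pyRange 2 (g + 1) 1).foldl (fun f j => f * j) 1
    if k == 0 then f
    else ((PySem.List.pyRange 2 (k + 1) 1).foldl (stepB g) (f, g * f)).2

-- ===== PRECONDITION & SPEC =====
-- A raises ValueError (math.factorial of a negative number) exactly when the loop runs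
-- with some n - i < 0, i.e. when 0 ≤ k and n < k; Pre_ excludes exactly those inputs.
def Pre_solve (n : Int) (k : Int) : Prop := k < 0 ∨ (0 ≤ k ∧ k ≤ n)
instance (n : Int) (k : Int) : Decidable (Pre_solve n k) := by unfold Pre_solve; infer_instance
def pvWitness_solve : Int × Int := (4, 2)

def Spec_solve (n : Int) (k : Int) (out : Int) : Prop := out = solve_alt n k
instance (n : Int) (k : Int) (out : Int) : Decidable (Spec_solve n k out) := by unfold Spec_solve; infer_instance

-- ===== CLAIM (what is proved, stated in full; the proofs are below) =====
def Claim_equal_solve : Prop := ∀ (n : Int) (k : Int), Dom_solve n k → Pre_solve n k → Spec_solve n k (solve n k)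

-- ===== LEMMAS AND PROOFS =====

-- the value both programs compute, characterised by the Pascal-style recursion
-- U g 0 = g!,  U g (j+1) = U (g+1) j - U g j  (U g j = A's sum at n = g+j, k = j)
def U : Nat → Nat → Int
  | g, 0 => g.factorial
  | g, j + 1 => U (g + 1) j - U g j

-- A's alternating sum, partial up to j terms, as a Finset sum
def Ssum (N K j : Nat) : Int :=
  ∑ i ∈ Finset.range j, (-1 : Int) ^ i * (K.choose i : Int) * ((N - i).factorial : Int)

lemma U_one (g : Nat) : U g 1 = (g : Int) * g.factorial := by
  have h : ((g + 1).factorial : Int) = ((g : Int) + 1) * g.factorial := by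
    rw [Nat.factorial_succ]; push_cast; ring
  simp [U, h]; ring

-- the two-term recurrence B runs, proved from U's defining recursion alone
lemma U_rec2 : ∀ (j g : Nat),
    U g (j + 2) = ((g : Int) + j + 1) * U g (j + 1) + ((j : Int) + 1) * U g j := by
  intro j
  induction j with
  | zero =>
    intro g
    have h1 : ((g + 1).factorial : Int) = ((g : Int) + 1) * g.factorial := by
      rw [Nat.factorial_succ]; push_cast; ring
    have h2 : ((g + 2).factorial : Int) = ((g : Int) + 2) * ((g : Int) + 1) * g.factorial := by
      rw [show g + 2 = (g + 1) + 1 from rfl, Nat.factorial_succ, Nat.factorial_succ]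
      push_cast; ring
    simp [U, h1, h2]; ring
  | succ j ih =>
    intro g
    have e3 : U g (j + 3) = U (g + 1) (j + 2) - U g (j + 2) := rfl
    have e2 : U g (j + 2) = U (g + 1) (j + 1) - U g (j + 1) := rfl
    have e1 : U g (j + 1) = U (g + 1) j - U g j := rfl
    have h1 := ih (g + 1)
    have h2 := ih g
    push_cast at h1 h2 ⊢
    rw [e3, h1, h2]
    have hA : U (g + 1) (j + 1) = U g (j + 2) + U g (j + 1) := by rw [e2]; ring
    have hB : U (g + 1) j = U g (j + 1) + U g j := by rw [e1]; ring
    rw [hA, hB, h2]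
    ring

-- Pascal's rule applied to A's sum: one more binomial row = difference of two sums
lemma Ssum_pascal (N j : Nat) :
    Ssum N (j + 1) (j + 2) = Ssum N j (j + 1) - Ssum (N - 1) j (j + 1) := by
  unfold Ssum
  rw [Finset.sum_range_succ' (n := j + 1)]
  have hsplit : ∀ i ∈ Finset.range (j + 1),
      (-1 : Int) ^ (i + 1) * ((j + 1).choose (i + 1) : Int) * ((N - (i + 1)).factorial : Int)
        = -((-1 : Int) ^ i * (j.choose i : Int) * ((N - 1 - i).factorial : Int))
          + (-1 : Int) ^ (i + 1) * (j.choose (i + 1) : Int) * ((N - 1 - i).factorial : Int) := by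
    intro i _
    have hc : (j + 1).choose (i + 1) = j.choose i + j.choose (i + 1) := Nat.choose_succ_succ j i
    have hsub : N - (i + 1) = N - 1 - i := by omega
    rw [hc, hsub]; push_cast; ring
  rw [Finset.sum_congr rfl hsplit, Finset.sum_add_distrib, Finset.sum_neg_distrib]
  have hlast : ∑ i ∈ Finset.range (j + 1),
      (-1 : Int) ^ (i + 1) * (j.choose (i + 1) : Int) * ((N - 1 - i).factorial : Int)
        = ∑ i ∈ Finset.range j,
      (-1 : Int) ^ (i + 1) * (j.choose (i + 1) : Int) * ((N - (i + 1)).factorial : Int) := by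
    rw [Finset.sum_range_succ]
    simp [Nat.choose_succ_self]
    refine Finset.sum_congr rfl fun i _ => by rw [show N - 1 - i = N - (i + 1) from by omega]
  rw [hlast]
  have hS : ∑ i ∈ Finset.range (j + 1),
      (-1 : Int) ^ i * (j.choose i : Int) * ((N - i).factorial : Int)
        = ∑ i ∈ Finset.range j,
      (-1 : Int) ^ (i + 1) * (j.choose (i + 1) : Int) * ((N - (i + 1)).factorial : Int)
        + (-1 : Int) ^ 0 * (j.choose 0 : Int) * ((N - 0).factorial : Int) :=
    Finset.sum_range_succ' _ j
  rw [hS]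
  simp
  ring

-- A's sum equals U on the diagonal
lemma Ssum_eq_U : ∀ (j N : Nat), j ≤ N → Ssum N j (j + 1) = U (N - j) j := by
  intro j
  induction j with
  | zero => intro N _; simp [Ssum, U]
  | succ j ih =>
    intro N hj
    rw [Ssum_pascal, ih N (by omega), ih (N - 1) (by omega)]
    have h1 : N - j = (N - (j + 1)) + 1 := by omega
    have h2 : N - 1 - j = N - (j + 1) := by omega
    rw [h1, h2]
    rfl

-- A's foldl computes the partial alternating sums
lemma foldl_stepA (N K : Nat) : ∀ j : Nat,
    (PySem.List.pyRange 0 (j : Int) 1).foldl (stepA (N : Int) (K : Int)) 0 = Ssum N K j := by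
  intro j
  induction j with
  | zero => simp [PySem.List.pyRange_one_eq_nil, Ssum]
  | succ j ih =>
    have hsplit := PySem.List.pyRange_one_succ_right (a := 0) (b := (j : Int)) (by positivity)
    push_cast
    rw [hsplit, List.foldl_append, ih]
    simp only [List.foldl_cons, List.foldl_nil]
    unfold stepA Ssum
    rw [Finset.sum_range_succ]
    have htK : ((K : Int).toNat) = K := by omega
    have htj : ((j : Int).toNat) = j := by omega
    have hNj : ((N : Int) - (j : Int)).toNat = N - j := by omega
    have hmod : PySem.Int.mod (j : Int) 2 = ((j % 2 : Nat) : Int) := by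
      rw [PySem.Int.mod_eq_emod_of_pos (by omega)]; push_cast; rfl
    rcases Nat.even_or_odd j with he | ho
    · rw [hmod, Nat.even_iff.mp he, htK, htj, hNj]
      simp [he.neg_one_pow]
    · rw [hmod, Nat.odd_iff.mp ho, htK, htj, hNj]
      simp [ho.neg_one_pow]
      ring

-- B's first loop computes g! (as an Int) for any natural g
lemma fact_prod (g : Nat) :
    (PySem.List.pyRange 2 ((g : Int) + 1) 1).foldl (fun f j => f * j) 1 = (g.factorial : Int) := by
  induction g with
  | zero => simp [PySem.List.pyRange_one_eq_nil]
  | succ g ih =>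
    by_cases h0 : g = 0
    · subst h0; simp [PySem.List.pyRange_one_eq_nil]
    · have h2 : (2 : Int) ≤ (g : Int) + 1 := by omega
      have hr := PySem.List.pyRange_one_succ_right (a := 2) (b := (g : Int) + 1) h2
      push_cast
      rw [hr, List.foldl_append, ih]
      simp [Nat.factorial_succ]; ring

-- B's second loop walks the recurrence: after reaching j = K it holds (U g (K-1), U g K)
lemma foldl_stepB (g : Nat) : ∀ K : Nat, 1 ≤ K →
    (PySem.List.pyRange 2 ((K : Int) + 1) 1).foldl (stepB (g : Int)) (U g 0, U g 1)
      = (U g (K - 1), U g K) := by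
  intro K
  induction K with
  | zero => intro h; omega
  | succ K ih =>
    intro _
    by_cases h1 : K = 0
    · subst h1; simp [PySem.List.pyRange_one_eq_nil]
    · have h2 : (2 : Int) ≤ (K : Int) + 1 := by omega
      have hr := PySem.List.pyRange_one_succ_right (a := 2) (b := (K : Int) + 1) h2
      push_cast
      rw [hr, List.foldl_append, ih (by omega)]
      simp only [List.foldl_cons, List.foldl_nil]
      unfold stepB
      obtain ⟨j, rfl⟩ : ∃ j, K = j + 1 := ⟨K - 1, by omega⟩
      have := U_rec2 j g
      refine Prod.ext (by simp) ?_
      simp only []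
      push_cast at this ⊢
      rw [this]
      ring

-- ===== VERDICT (by name: the statement is the Claim_ definition above) =====
theorem solve_spec : Claim_equal_solve := by
  intro n k _ hpre
  unfold Spec_solve solve solve_alt
  rcases hpre with hneg | ⟨hk0, hkn⟩
  · rw [if_pos hneg, PySem.List.pyRange_one_eq_nil (by omega : k + 1 ≤ 0)]
    simp
  · rw [if_neg (by omega)]
    obtain ⟨K, rfl⟩ : ∃ K : Nat, k = (K : Int) := ⟨k.toNat, by omega⟩
    obtain ⟨N, rfl⟩ : ∃ N : Nat, n = (N : Int) := ⟨n.toNat, by omega⟩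
    have hKN : K ≤ N := by exact_mod_cast hkn
    have hg : (N : Int) - (K : Int) = ((N - K : Nat) : Int) := by omega
    have hA : (PySem.List.pyRange 0 ((K : Int) + 1) 1).foldl (stepA (N : Int) (K : Int)) 0
        = U (N - K) K := by
      rw [show ((K : Int) + 1) = (((K + 1 : Nat)) : Int) by push_cast; ring,
        foldl_stepA N K (K + 1), Ssum_eq_U K N hKN]
    simp only [hg, fact_prod (N - K)]
    by_cases hK0 : K = 0
    · subst hK0
      simp only [Nat.cast_zero, beq_self_eq_true, if_true]
      simp only [Nat.cast_zero] at hA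
      exact hA
    · rw [if_neg (by simp [hK0] : ¬ ((K : Int) == 0) = true)]
      have hgf : ((N - K : Nat) : Int) * ((N - K).factorial : Int) = U (N - K) 1 := by
        rw [U_one]
      have hf0 : ((N - K).factorial : Int) = U (N - K) 0 := rfl
      rw [hgf, hf0, foldl_stepB (N - K) K (by omega), hA]
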